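-- pv_equiv track=rewrite | github.com/pypi-data/pypi-mirror-49 | packages/shamir-mnemonic/shamir-mnemonic-0.1.0.tar.gz/shamir-mnemonic-0.1.0/shamir_mnemonic/__init__.py | _rs1024_polymod
-- ===== SOURCE A (Python) =====
-- def _rs1024_polymod(values):
--     GEN = (
--         0xE0E040,
--         0x1C1C080,
--         0x3838100,
--         0x7070200,
--         0xE0E0009,
--         0x1C0C2412,
--         0x38086C24,
--         0x3090FC48,
--         0x21B1F890,
--         0x3F3F120,
--     )
--     chk = 1
--     for v in values:
--         b = chk >> 20
--         chk = (chk & 0xFFFFF) << 10 ^ v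
--         for i in range(10):
--             chk ^= GEN[i] if ((b >> i) & 1) else 0
--     return chk
-- ===== SOURCE B (Python) =====
-- GEN = (
--     0xE0E040,
--     0x1C1C080,
--     0x3838100,
--     0x7070200,
--     0xE0E0009,
--     0x1C0C2412,
--     0x38086C24,
--     0x3090FC48,
--     0x21B1F890,
--     0x3F3F120,
-- )
--
--
-- def _xor_mask(x):
--     t = 0
--     for i, g in enumerate(GEN):
--         if (x >> i) & 1:
--             t ^= g
--     return t
--
--
-- TABLE = [_xor_mask(x) for x in range(1024)]
--
--
-- def _rs1024_polymod(values):
--     chk = 1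
--     for v in values:
--         chk = ((chk & 0xFFFFF) << 10) ^ v ^ TABLE[(chk >> 20) % 1024]
--     return chk
-- ===== Notes on version B (the rewrite author's own statement) =====
-- stated objective: faster
-- what changed: B precomputes a 1024-entry table of the linear map the inner 10-iteration conditional-XOR loop computes (built once at module scope), so each step of the outer loop is a single table lookup indexed by the low 10 bits of chk >> 20.
import Mathlib
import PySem

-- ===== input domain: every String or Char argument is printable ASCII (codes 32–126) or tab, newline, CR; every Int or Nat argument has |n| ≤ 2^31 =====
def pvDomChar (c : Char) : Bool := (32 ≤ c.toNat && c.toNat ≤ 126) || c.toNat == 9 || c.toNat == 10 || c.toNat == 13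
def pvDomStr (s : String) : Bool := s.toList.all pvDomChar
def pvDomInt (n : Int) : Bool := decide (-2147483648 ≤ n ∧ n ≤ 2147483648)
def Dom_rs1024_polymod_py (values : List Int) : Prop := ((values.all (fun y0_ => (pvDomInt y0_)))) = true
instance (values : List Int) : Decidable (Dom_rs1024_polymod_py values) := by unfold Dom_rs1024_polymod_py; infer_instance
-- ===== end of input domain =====

-- B replaces the 10-iteration inner conditional-XOR loop by a 1024-entry table built once
-- (objective: faster by a constant factor on long inputs).

-- ===== PORT A =====
-- the GEN tuple of the Python source, as a list constant
def pvGEN : List Int := [0xE0E040, 0x1C1C080, 0x3838100, 0x7070200, 0xE0E0009,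
  0x1C0C2412, 0x38086C24, 0x3090FC48, 0x21B1F890, 0x3F3F120]

-- literal port of A; 'i.toNat' is exact: i ranges over 0..9 (range(10))
def rs1024_polymod_py (values : List Int) : Int :=
  values.foldl (fun chk v =>
    let b := chk >>> (20 : Nat)
    let chk1 := PySem.Int.bxor (PySem.Int.band chk 0xFFFFF <<< (10 : Nat)) v
    (PySem.List.pyRange 0 10 1).foldl
      (fun c i =>
        PySem.Int.bxor c
          (if PySem.Int.band (b >>> i.toNat) 1 ≠ 0 then PySem.List.pyGetD pvGEN i 0 else 0))
      chk1) 1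

-- ===== PORT B =====
-- port of Source B's _xor_mask helper ('p.1.toNat' is exact: enumerate indices are 0..9)
def pvXorMask (x : Int) : Int :=
  (PySem.List.enumerate pvGEN 0).foldl
    (fun t p => if PySem.Int.band (x >>> p.1.toNat) 1 ≠ 0 then PySem.Int.bxor t p.2 else t) 0

-- port of Source B's module-level TABLE comprehension
def pvTABLE : List Int := (PySem.List.pyRange 0 1024 1).map pvXorMask

def rs1024_polymod_py_alt (values : List Int) : Int :=
  values.foldl (fun chk v =>
    PySem.Int.bxor (PySem.Int.bxor (PySem.Int.band chk 0xFFFFF <<< (10 : Nat)) v)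
      (PySem.List.pyGetD pvTABLE (PySem.Int.mod (chk >>> (20 : Nat)) 1024) 0)) 1

-- ===== PRECONDITION & SPEC =====
def Spec_rs1024_polymod_py (values : List Int) (out : Int) : Prop := out = rs1024_polymod_py_alt values
instance (values : List Int) (out : Int) : Decidable (Spec_rs1024_polymod_py values out) := by unfold Spec_rs1024_polymod_py; infer_instance

-- ===== CLAIM (what is proved, stated in full; the proofs are below) =====
def Claim_equal_rs1024_polymod_py : Prop := ∀ (values : List Int), Dom_rs1024_polymod_py values → Spec_rs1024_polymod_py values (rs1024_polymod_py values)

-- ===== LEMMAS AND PROOFS =====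

-- sign/magnitude normal form for PySem.Int.bxor, used to prove associativity
def pvMk (s : Bool) (n : Nat) : Int := if s then -(n:Int) - 1 else (n:Int)
def pvMag (a : Int) : Nat := if 0 ≤ a then a.toNat else (-a-1).toNat
def pvNegb (a : Int) : Bool := !decide (0 ≤ a)

theorem pvBxor_mk (a b : Int) :
    PySem.Int.bxor a b = pvMk (xor (pvNegb a) (pvNegb b)) (pvMag a ^^^ pvMag b) := by
  unfold PySem.Int.bxor pvMk pvMag pvNegb
  rcases le_or_gt 0 a with ha | ha <;> rcases le_or_gt 0 b with hb | hb
  · simp [ha, hb]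
  · simp [ha, not_le.mpr hb]
  · simp [hb, not_le.mpr ha]
  · simp [not_le.mpr ha, not_le.mpr hb]

theorem pvNegb_mk (s : Bool) (n : Nat) : pvNegb (pvMk s n) = s := by
  cases s
  · simp [pvMk, pvNegb]
  · simp [pvMk, pvNegb]; omega

theorem pvMag_mk (s : Bool) (n : Nat) : pvMag (pvMk s n) = n := by
  cases s
  · simp [pvMk, pvMag]
  · simp [pvMk, pvMag]; omega

theorem pvBxor_assoc (a b c : Int) :
    PySem.Int.bxor (PySem.Int.bxor a b) c = PySem.Int.bxor a (PySem.Int.bxor b c) := by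
  rw [pvBxor_mk a b, pvBxor_mk b c, pvBxor_mk _ c, pvBxor_mk a _,
    pvNegb_mk, pvMag_mk, pvNegb_mk, pvMag_mk, Bool.xor_assoc, Nat.xor_assoc]

theorem pvZero_bxor (a : Int) : PySem.Int.bxor 0 a = a := by
  rw [PySem.Int.bxor_comm, PySem.Int.bxor_zero]

-- bit i < 10 of an integer only depends on the integer modulo 1024
theorem pvBit (b : Int) (i : Nat) (hi : i < 10) :
    PySem.Int.band (b >>> i) 1 = PySem.Int.band (PySem.Int.mod b 1024 >>> i) 1 := by
  interval_cases i <;>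
  · rw [PySem.Int.band_one, PySem.Int.band_one, Int.shiftRight_eq_div_pow,
      Int.shiftRight_eq_div_pow, PySem.Int.mod_eq_emod_of_pos (by norm_num),
      PySem.Int.mod_eq_emod_of_pos (by norm_num), PySem.Int.mod_eq_emod_of_pos (by norm_num)]
    norm_num <;> omega

theorem pvIteHoist (c : Prop) [inst : Decidable c] (t g : Int) :
    (if c then PySem.Int.bxor t g else t) = PySem.Int.bxor t (if c then g else 0) := by
  split <;> simp [PySem.Int.bxor_zero]

-- one step of A's outer loop equals one step of B's outer loop
theorem pvStepEq (chk v : Int) :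
    (let b := chk >>> (20 : Nat)
     let chk1 := PySem.Int.bxor (PySem.Int.band chk 0xFFFFF <<< (10 : Nat)) v
     (PySem.List.pyRange 0 10 1).foldl
      (fun c i =>
        PySem.Int.bxor c
          (if PySem.Int.band (b >>> i.toNat) 1 ≠ 0 then PySem.List.pyGetD pvGEN i 0 else 0))
      chk1) =
    PySem.Int.bxor (PySem.Int.bxor (PySem.Int.band chk 0xFFFFF <<< (10 : Nat)) v)
      (PySem.List.pyGetD pvTABLE (PySem.Int.mod (chk >>> (20 : Nat)) 1024) 0) := by
  have htab : PySem.List.pyGetD pvTABLE (PySem.Int.mod (chk >>> (20 : Nat)) 1024) 0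
      = pvXorMask (PySem.Int.mod (chk >>> (20 : Nat)) 1024) := by
    unfold pvTABLE
    exact PySem.List.pyGetD_map_pyRange_of_nonneg _ _ _ _
      (PySem.Int.mod_nonneg _ (by norm_num)) (PySem.Int.mod_lt _ (by norm_num))
  rw [htab]
  show (PySem.List.pyRange 0 10 1).foldl _ _ = _
  simp only [pvXorMask, pvIteHoist,
    show PySem.List.pyRange 0 10 1 = [0,1,2,3,4,5,6,7,8,9] by decide,
    show PySem.List.enumerate pvGEN 0
      = [(0, 0xE0E040), (1, 0x1C1C080), (2, 0x3838100), (3, 0x7070200), (4, 0xE0E0009),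
         (5, 0x1C0C2412), (6, 0x38086C24), (7, 0x3090FC48), (8, 0x21B1F890), (9, 0x3F3F120)] by decide,
    List.foldl_cons, List.foldl_nil,
    show PySem.List.pyGetD pvGEN 0 0 = 0xE0E040 by decide,
    show PySem.List.pyGetD pvGEN 1 0 = 0x1C1C080 by decide,
    show PySem.List.pyGetD pvGEN 2 0 = 0x3838100 by decide,
    show PySem.List.pyGetD pvGEN 3 0 = 0x7070200 by decide,
    show PySem.List.pyGetD pvGEN 4 0 = 0xE0E0009 by decide,
    show PySem.List.pyGetD pvGEN 5 0 = 0x1C0C2412 by decide,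
    show PySem.List.pyGetD pvGEN 6 0 = 0x38086C24 by decide,
    show PySem.List.pyGetD pvGEN 7 0 = 0x3090FC48 by decide,
    show PySem.List.pyGetD pvGEN 8 0 = 0x21B1F890 by decide,
    show PySem.List.pyGetD pvGEN 9 0 = 0x3F3F120 by decide,
    Int.shiftRight_natCast_right, Int.toNat_zero, Int.toNat_one,
    show Int.toNat 2 = 2 by decide, show Int.toNat 3 = 3 by decide,
    show Int.toNat 4 = 4 by decide, show Int.toNat 5 = 5 by decide,
    show Int.toNat 6 = 6 by decide, show Int.toNat 7 = 7 by decide,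
    show Int.toNat 8 = 8 by decide, show Int.toNat 9 = 9 by decide]
  rw [pvBit _ 0 (by norm_num), pvBit _ 1 (by norm_num), pvBit _ 2 (by norm_num),
    pvBit _ 3 (by norm_num), pvBit _ 4 (by norm_num), pvBit _ 5 (by norm_num),
    pvBit _ 6 (by norm_num), pvBit _ 7 (by norm_num), pvBit _ 8 (by norm_num),
    pvBit _ 9 (by norm_num)]
  simp only [pvBxor_assoc, pvZero_bxor]

-- ===== VERDICT (by name: the statement is the Claim_ definition above) =====
theorem rs1024_polymod_py_spec : Claim_equal_rs1024_polymod_py := by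
  intro values _
  show rs1024_polymod_py values = rs1024_polymod_py_alt values
  unfold rs1024_polymod_py rs1024_polymod_py_alt
  congr 1
  funext chk v
  exact pvStepEq chk v
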